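-- pv_equiv track=rewrite | github.com/winstonjay/pepys-travels | parse_diary.py | process_inline_footnotes
-- ===== SOURCE A (Python) =====
-- from typing import List, Dict, Optional
--
-- def process_inline_footnotes(text: str, start_index: int, footnotes_list: List[str]) -> str:
--     """
--     Extract inline footnotes [text] to {N}, keep restorations [he].
--     """
--     result = ""
--     i = 0
--     n = len(text)
--     while i < n:
--         if text[i] == '[':
--             # Find closing bracket
--             j = text.find(']', i)
--             if j != -1:
--                 content = text[i+1:j]
--
--                 # Heuristic: Keep if short (< 25 chars) or seems to be part of sentence flow
--                 # Most explanatory notes are long sentences or start with "Ed. note" or names/definitions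
--
--                 is_restoration = False
--
--                 # Check for specific restoration patterns
--                 if len(content) < 25:
--                     # Check if it looks like a definition?
--                     # "i.e." is a definition/footnote usually
--                     if content.strip().lower().startswith("i.e."):
--                         is_restoration = False # Treat as footnote
--                     elif "note" in content.lower():
--                          is_restoration = False
--                     else:
--                         # Assume short things are restorations like [he], [she], [dirted]
--                         is_restoration = True
--
--                 # Also check for "Ed. note" or similar explicit markers
--                 if "Ed." in content or "note:" in content:
--                     is_restoration = False
--
--                 if is_restoration:
--                     result += text[i:j+1] # Keep it including brackets
--                 else:
--                     # Extract as footnote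
--                     footnotes_list.append(content)
--                     marker = f"{{{start_index + len(footnotes_list) - 1}}}"
--                     result += marker
--
--                 i = j + 1
--                 continue
--         result += text[i]
--         i += 1
--     return result
-- ===== SOURCE B (Python) =====
-- def process_inline_footnotes(text, start_index, footnotes_list):
--     """Find-and-jump rewrite: hop between brackets with str.find and join chunks."""
--     parts = []
--     pos = 0
--     while True:
--         b = text.find('[', pos)
--         if b == -1:
--             parts.append(text[pos:])
--             break
--         e = text.find(']', b)
--         if e == -1:
--             parts.append(text[pos:])
--             break
--         parts.append(text[pos:b])
--         content = text[b + 1:e]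
--         keep = (len(content) < 25
--                 and not content.strip().lower().startswith("i.e.")
--                 and "note" not in content.lower()
--                 and "Ed." not in content
--                 and "note:" not in content)
--         if keep:
--             parts.append(text[b:e + 1])
--         else:
--             footnotes_list.append(content)
--             parts.append("{%d}" % (start_index + len(footnotes_list) - 1))
--         pos = e + 1
--     return "".join(parts)
-- ===== Notes on version B (the rewrite author's own statement) =====
-- stated objective: faster
-- what changed: B replaces A's character-by-character while loop with repeated string += by str.find jumps between brackets, slicing whole chunks into a parts list joined once, and collapses A's branchy is_restoration heuristic into a single boolean keep expression.
import Mathlib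
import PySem

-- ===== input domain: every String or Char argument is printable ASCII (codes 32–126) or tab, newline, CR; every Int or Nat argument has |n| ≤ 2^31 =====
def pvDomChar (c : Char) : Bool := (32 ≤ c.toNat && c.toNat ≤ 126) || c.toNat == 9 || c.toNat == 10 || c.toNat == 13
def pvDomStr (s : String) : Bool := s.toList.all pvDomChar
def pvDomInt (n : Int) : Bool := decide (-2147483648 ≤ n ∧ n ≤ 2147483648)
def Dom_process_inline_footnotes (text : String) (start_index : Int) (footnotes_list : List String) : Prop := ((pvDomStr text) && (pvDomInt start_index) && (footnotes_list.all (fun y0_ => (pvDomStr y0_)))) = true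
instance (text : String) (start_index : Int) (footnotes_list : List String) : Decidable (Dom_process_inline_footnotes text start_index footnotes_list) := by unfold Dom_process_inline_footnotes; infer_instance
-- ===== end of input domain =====

-- B replaces A's char-by-char scan (string += per char) with str.find jumps between brackets,
-- collecting whole chunks and joining them once (objective: faster, measured by the timing
-- run). Both A and B append the extracted
-- footnote contents to footnotes_list in place (same mutation); equivalence here is about
-- the returned string (the list enters only through its length, carried as loop state).

-- ===== PORT A =====
-- A's is_restoration heuristic, branch for branch.
def pvAheur (content : List Char) : Bool :=
  let r :=
    if content.length < 25 then
      if PySem.Chars.startswith (PySem.Chars.lower (PySem.Chars.strip content)) ("i.e.".toList) then false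
      else if PySem.Chars.isIn ("note".toList) (PySem.Chars.lower content) then false
      else true
    else false
  if PySem.Chars.isIn ("Ed.".toList) content || PySem.Chars.isIn ("note:".toList) content then false
  else r

-- A's while loop: the loop index i is represented by the remaining suffix of text
-- (text.find(']', i) becomes a find on the suffix, slices become take/drop on it);
-- result and footnotes_list are the accumulators.
def pvArun (start_index : Int) (l : List Char) (fl : List (List Char)) (acc : List Char) : List Char :=
  match l with
  | [] => acc
  | c :: rest =>
    if c = '[' then
      let f := PySem.Chars.find (c :: rest) ("]".toList)
      if f = -1 then pvArun start_index rest fl (acc ++ [c])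
      else
        let j := f.toNat
        let content := ((c :: rest).take j).drop 1
        if pvAheur content then
          pvArun start_index ((c :: rest).drop (j + 1)) fl (acc ++ (c :: rest).take (j + 1))
        else
          let fl' := fl ++ [content]
          pvArun start_index ((c :: rest).drop (j + 1)) fl'
            (acc ++ ('{' :: PySem.Int.toChars (start_index + (fl'.length : Int) - 1) ++ ['}']))
    else pvArun start_index rest fl (acc ++ [c])
termination_by l.length
decreasing_by all_goals (simp [List.length_drop]; try omega)

def process_inline_footnotes (text : String) (start_index : Int) (footnotes_list : List String) : String :=
  String.ofList (pvArun start_index text.toList (footnotes_list.map String.toList) [])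

-- ===== PORT B =====
-- B's keep condition, a single boolean expression.
def pvBkeep (content : List Char) : Bool :=
  decide (content.length < 25)
  && !(PySem.Chars.startswith (PySem.Chars.lower (PySem.Chars.strip content)) ("i.e.".toList))
  && !(PySem.Chars.isIn ("note".toList) (PySem.Chars.lower content))
  && !(PySem.Chars.isIn ("Ed.".toList) content)
  && !(PySem.Chars.isIn ("note:".toList) content)

-- B's find-and-jump loop: pos is represented by the remaining suffix, parts is the chunk list.
def pvBrun (start_index : Int) (rest : List Char) (fl : List (List Char)) (parts : List (List Char)) : List (List Char) :=
  let b := PySem.Chars.find rest ("[".toList)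
  if hb : b = -1 then parts ++ [rest]
  else
    let e := PySem.Chars.find (rest.drop b.toNat) ("]".toList)
    if e = -1 then parts ++ [rest]
    else
      let content := (rest.drop (b.toNat + 1)).take (e.toNat - 1)
      if pvBkeep content then
        pvBrun start_index (rest.drop (b.toNat + e.toNat + 1)) fl
          (parts ++ [rest.take b.toNat, (rest.drop b.toNat).take (e.toNat + 1)])
      else
        let fl' := fl ++ [content]
        pvBrun start_index (rest.drop (b.toNat + e.toNat + 1)) fl'
          (parts ++ [rest.take b.toNat, '{' :: PySem.Int.toChars (start_index + (fl'.length : Int) - 1) ++ ['}']])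
termination_by rest.length
decreasing_by
  all_goals
    have hne : rest ≠ [] := by
      intro h; subst h; exact hb (by decide)
    have : 0 < rest.length := List.length_pos_of_ne_nil hne
    simp [List.length_drop]; omega

-- "".join(parts) on the char level is flatten.
def process_inline_footnotes_alt (text : String) (start_index : Int) (footnotes_list : List String) : String :=
  String.ofList ((pvBrun start_index text.toList (footnotes_list.map String.toList) []).flatten)

-- ===== PRECONDITION & SPEC =====
def Spec_process_inline_footnotes (text : String) (start_index : Int) (footnotes_list : List String) (out : String) : Prop := out = process_inline_footnotes_alt text start_index footnotes_list
instance (text : String) (start_index : Int) (footnotes_list : List String) (out : String) : Decidable (Spec_process_inline_footnotes text start_index footnotes_list out) := by unfold Spec_process_inline_footnotes; infer_instance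

-- ===== CLAIM (what is proved, stated in full; the proofs are below) =====
def Claim_equal_process_inline_footnotes : Prop := ∀ (text : String) (start_index : Int) (footnotes_list : List String), Dom_process_inline_footnotes text start_index footnotes_list → Spec_process_inline_footnotes text start_index footnotes_list (process_inline_footnotes text start_index footnotes_list)

-- ===== LEMMAS AND PROOFS =====

-- A's heuristic and B's one-expression condition agree ("note:" ⊆ content forces "note" ⊆ lower content only when short, but the extra conjunct is harmless).
theorem pv_heur_eq (c : List Char) : pvAheur c = pvBkeep c := by
  unfold pvAheur pvBkeep
  split_ifs <;> simp_all <;> (rintro h; rcases ‹_ ∨ _› with h' | h' <;> simp_all)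

theorem pvArun_acc_aux : ∀ (n : Nat) (si : Int) (l : List Char) (fl : List (List Char)) (acc : List Char),
    l.length ≤ n → pvArun si l fl acc = acc ++ pvArun si l fl [] := by
  intro n
  induction n with
  | zero =>
      intro si l fl acc h
      have : l = [] := List.eq_nil_of_length_eq_zero (Nat.le_zero.mp h)
      subst this; simp [pvArun]
  | succ n ih =>
      intro si l fl acc h
      match l with
      | [] => simp [pvArun]
      | c :: rest =>
        simp only [List.length_cons] at h
        rw [pvArun]; conv_rhs => rw [pvArun]
        by_cases hc : c = '['
        · simp only [if_pos hc]
          by_cases hf : PySem.Chars.find (c :: rest) ("]".toList) = -1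
          · simp only [if_pos hf]
            rw [ih _ _ _ _ (by omega)]
            conv_rhs => rw [ih _ _ _ _ (by omega)]
            simp
          · simp only [if_neg hf]
            by_cases hk : pvAheur ((List.take (PySem.Chars.find (c :: rest) ("]".toList)).toNat (c :: rest)).drop 1) = true
            · simp only [if_pos hk]
              rw [ih _ _ _ _ (by simp; omega)]
              conv_rhs => rw [ih _ _ _ _ (by simp; omega)]
              simp
            · simp only [if_neg hk]
              rw [ih _ _ _ _ (by simp; omega)]
              conv_rhs => rw [ih _ _ _ _ (by simp; omega)]
              simp
        · simp only [if_neg hc]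
          rw [ih _ _ _ _ (by omega)]
          conv_rhs => rw [ih _ _ _ _ (by omega)]
          simp

theorem pvArun_acc (si : Int) (l : List Char) (fl : List (List Char)) (acc : List Char) :
    pvArun si l fl acc = acc ++ pvArun si l fl [] :=
  pvArun_acc_aux l.length si l fl acc le_rfl

theorem pvBrun_acc_aux : ∀ (n : Nat) (si : Int) (l : List Char) (fl parts : List (List Char)),
    l.length ≤ n → pvBrun si l fl parts = parts ++ pvBrun si l fl [] := by
  intro n
  induction n with
  | zero =>
      intro si l fl parts h
      have : l = [] := List.eq_nil_of_length_eq_zero (Nat.le_zero.mp h)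
      subst this
      rw [pvBrun]; conv_rhs => rw [pvBrun]
      have hfe : PySem.Chars.find ([] : List Char) ("[".toList) = -1 := by decide
      rw [dif_pos hfe, dif_pos hfe]
      simp
  | succ n ih =>
      intro si l fl parts h
      rw [pvBrun]; conv_rhs => rw [pvBrun]
      by_cases hb : PySem.Chars.find l ("[".toList) = -1
      · simp only [dif_pos hb]; simp
      · simp only [dif_neg hb]
        by_cases he : PySem.Chars.find (l.drop (PySem.Chars.find l ("[".toList)).toNat) ("]".toList) = -1
        · simp only [if_pos he]; simp
        · simp only [if_neg he]
          by_cases hk : pvBkeep ((l.drop ((PySem.Chars.find l ("[".toList)).toNat + 1)).take ((PySem.Chars.find (l.drop (PySem.Chars.find l ("[".toList)).toNat) ("]".toList)).toNat - 1)) = true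
          · simp only [if_pos hk]
            rw [ih _ _ _ _ (by simp; omega)]
            conv_rhs => rw [ih _ _ _ _ (by simp; omega)]
            simp
          · simp only [if_neg hk]
            rw [ih _ _ _ _ (by simp; omega)]
            conv_rhs => rw [ih _ _ _ _ (by simp; omega)]
            simp

theorem pvBrun_acc (si : Int) (l : List Char) (fl parts : List (List Char)) :
    pvBrun si l fl parts = parts ++ pvBrun si l fl [] :=
  pvBrun_acc_aux l.length si l fl parts le_rfl

-- A copies any bracket-free prefix character by character.
theorem pvArun_skip (si : Int) (fl : List (List Char)) :
    ∀ (pre rest acc : List Char), (∀ c ∈ pre, c ≠ '[') →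
      pvArun si (pre ++ rest) fl acc = pvArun si rest fl (acc ++ pre) := by
  intro pre
  induction pre with
  | nil => intro rest acc _; simp
  | cons c pre ih =>
      intro rest acc h
      have hc : ¬ c = '[' := h c (by simp)
      rw [List.cons_append, pvArun]
      simp only [if_neg hc]
      rw [ih _ _ (fun d hd => h d (by simp [hd]))]
      simp

-- once no ']' remains, A copies everything verbatim.
theorem pvArun_noclose (si : Int) :
    ∀ (l : List Char) (fl : List (List Char)) (acc : List Char), ']' ∉ l →
      pvArun si l fl acc = acc ++ l := by
  intro l
  induction l with
  | nil => intro fl acc _; simp [pvArun]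
  | cons c rest ih =>
      intro fl acc h
      rw [pvArun]
      by_cases hc : c = '['
      · have hf : PySem.Chars.find (c :: rest) ("]".toList) = -1 := by
          rw [show ("]".toList) = [']'] from rfl, PySem.Chars.find_eq_neg_one_iff,
            List.singleton_infix_iff]
          exact h
        simp only [if_pos hc, if_pos hf]
        rw [ih _ _ (fun hm => h (by simp [hm]))]
        simp
      · simp only [if_neg hc]
        rw [ih _ _ (fun hm => h (by simp [hm]))]
        simp

theorem pv_main_aux : ∀ (n : Nat) (si : Int) (l : List Char) (fl : List (List Char)),
    l.length ≤ n → pvArun si l fl [] = (pvBrun si l fl []).flatten := by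
  intro n
  induction n with
  | zero =>
      intro si l fl h
      have : l = [] := List.eq_nil_of_length_eq_zero (Nat.le_zero.mp h)
      subst this
      rw [pvBrun]
      have hfe : PySem.Chars.find ([] : List Char) ("[".toList) = -1 := by decide
      rw [dif_pos hfe]
      simp [pvArun]
  | succ n ih =>
      intro si l fl h
      conv_rhs => rw [pvBrun]
      by_cases hb : PySem.Chars.find l ("[".toList) = -1
      · rw [dif_pos hb]
        have hno : ∀ c ∈ l, c ≠ '[' := by
          intro c hc hceq
          rw [show ("[".toList) = ['['] from rfl, PySem.Chars.find_eq_neg_one_iff,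
            List.singleton_infix_iff] at hb
          exact hb (hceq ▸ hc)
        have := pvArun_skip si fl l [] [] hno
        simp only [List.append_nil, List.nil_append] at this
        rw [this, pvArun]
        simp
      · rw [dif_neg hb]
        have h0 : 0 ≤ PySem.Chars.find l ("[".toList) := by
          have := PySem.Chars.neg_one_le_find l ("[".toList)
          omega
        obtain ⟨hpre, hmin⟩ := PySem.Chars.find_spec (s := l) (sub := ("[".toList)) h0
        set k := (PySem.Chars.find l ("[".toList)).toNat with hk
        obtain ⟨suf, hsuf⟩ : ∃ suf, l.drop k = '[' :: suf := by
          obtain ⟨t, ht⟩ := hpre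
          exact ⟨t, ht.symm⟩
        have htk : ∀ c ∈ l.take k, c ≠ '[' := by
          intro c hc hceq
          subst hceq
          obtain ⟨i, hi, hget⟩ := List.mem_take_iff_getElem.mp hc
          have hik : i < k := lt_of_lt_of_le hi (min_le_left _ _)
          have hil : i < l.length := lt_of_lt_of_le hi (min_le_right _ _)
          refine hmin i hik ⟨l.drop (i+1), ?_⟩
          rw [show ("[".toList) = ['['] from rfl]
          rw [← List.getElem_cons_drop hil, hget]
          rfl
        have hA1 : pvArun si l fl [] = pvArun si ('[' :: suf) fl (l.take k) := by
          conv_lhs => rw [← List.take_append_drop k l, hsuf]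
          rw [pvArun_skip si fl _ _ _ htk]
          simp
        rw [hA1, pvArun]
        simp only [if_pos rfl]
        have hfeq : PySem.Chars.find ('[' :: suf) ("]".toList) =
            PySem.Chars.find (l.drop k) ("]".toList) := by rw [hsuf]
        by_cases he : PySem.Chars.find (l.drop k) ("]".toList) = -1
        · rw [if_pos he]
          rw [if_pos (hfeq.trans he)]
          have hnc : ']' ∉ suf := by
            rw [show ("]".toList) = [']'] from rfl, PySem.Chars.find_eq_neg_one_iff,
              List.singleton_infix_iff, hsuf] at he
            intro hm; exact he (by simp [hm])
          rw [pvArun_noclose si suf fl _ hnc]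
          have : l.take k ++ '[' :: suf = l := by rw [← hsuf, List.take_append_drop]
          simp [this]
        · rw [if_neg he]
          rw [if_neg (fun hh => he (hfeq.symm.trans hh))]
          have he0 : 0 ≤ PySem.Chars.find (l.drop k) ("]".toList) := by
            have := PySem.Chars.neg_one_le_find (l.drop k) ("]".toList)
            omega
          set e := (PySem.Chars.find (l.drop k) ("]".toList)).toNat with hee
          have he1 : 1 ≤ e := by
            by_contra hlt
            have he00 : e = 0 := by omega
            obtain ⟨hp2, _⟩ := PySem.Chars.find_spec (s := l.drop k) (sub := ("]".toList)) he0
            rw [← hee, he00, List.drop_zero, hsuf] at hp2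
            obtain ⟨t, ht⟩ := hp2
            simp at ht
          have hEf : (PySem.Chars.find ('[' :: suf) ("]".toList)).toNat = e := by rw [hfeq]
          rw [hEf]
          -- identify A's content/chunk/remainder with B's
          have hdropsuf : l.drop (k + 1) = suf := by
            rw [← List.drop_drop, hsuf]; simp
          have hcontent : (('[' :: suf).take e).drop 1 = (l.drop (k + 1)).take (e - 1) := by
            rw [hdropsuf]
            conv_lhs => rw [show e = (e - 1) + 1 from by omega]
            simp [List.take_succ_cons]
          have hchunk : ('[' :: suf).take (e + 1) = (l.drop k).take (e + 1) := by rw [hsuf]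
          have hrem : ('[' :: suf).drop (e + 1) = l.drop (k + e + 1) := by
            rw [← hsuf, List.drop_drop]
            ring_nf
          have hlen2 : (l.drop (k + e + 1)).length ≤ n := by simp; omega
          rw [pv_heur_eq, hcontent]
          by_cases hkeep : pvBkeep ((l.drop (k + 1)).take (e - 1)) = true
          · rw [if_pos hkeep, if_pos hkeep]
            rw [pvArun_acc, hrem, ih _ _ _ hlen2]
            conv_rhs => rw [pvBrun_acc]
            simp [hchunk]
          · rw [if_neg hkeep, if_neg hkeep]
            rw [pvArun_acc, hrem, ih _ _ _ hlen2]
            conv_rhs => rw [pvBrun_acc]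
            simp

theorem pv_main (si : Int) (l : List Char) (fl : List (List Char)) :
    pvArun si l fl [] = (pvBrun si l fl []).flatten :=
  pv_main_aux l.length si l fl le_rfl

theorem process_inline_footnotes_spec : Claim_equal_process_inline_footnotes := by
  intro text si fl _
  unfold Spec_process_inline_footnotes process_inline_footnotes process_inline_footnotes_alt
  rw [pv_main]
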